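-- pv_equiv track=rewrite | github.com/AshtonVaughan/bountyhound | bountyhound-agent/engine/blockchain/solidity/contract_analyzer.py | check_reentrancy
-- ===== SOURCE A (Python) =====
-- def check_reentrancy(source: str) -> bool:
--     """
--     Check for reentrancy patterns
--
--     Simple heuristic: external call before state change
--     """
--     lines = source.split('\n')
--
--     for i, line in enumerate(lines):
--         # Look for external calls
--         if any(pattern in line for pattern in ['.call{', '.transfer(', '.send(']):
--             # Check if state update happens after
--             for j in range(i + 1, min(i + 5, len(lines))):
--                 if '=' in lines[j] and 'balance' in lines[j].lower():
--                     return True  # Potential reentrancy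
--
--     return False
-- ===== SOURCE B (Python) =====
-- def check_reentrancy(source: str) -> bool:
--     """Single pass: remember the index of the most recent external-call line
--     and flag a balance-updating line that appears within 4 lines after it."""
--     last_call = -10
--     for i, line in enumerate(source.split('\n')):
--         if '=' in line and 'balance' in line.lower() and i - last_call <= 4:
--             return True
--         if '.call{' in line or '.transfer(' in line or '.send(' in line:
--             last_call = i
--     return False
-- ===== Notes on version B (the rewrite author's own statement) =====
-- stated objective: simpler
-- what changed: Replaced A's nested scan (for every external-call line, rescan the next four lines for a balance assignment) by a single pass that remembers the index of the most recent external-call line and flags a balance-assignment line within 4 lines of it.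
import Mathlib
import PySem

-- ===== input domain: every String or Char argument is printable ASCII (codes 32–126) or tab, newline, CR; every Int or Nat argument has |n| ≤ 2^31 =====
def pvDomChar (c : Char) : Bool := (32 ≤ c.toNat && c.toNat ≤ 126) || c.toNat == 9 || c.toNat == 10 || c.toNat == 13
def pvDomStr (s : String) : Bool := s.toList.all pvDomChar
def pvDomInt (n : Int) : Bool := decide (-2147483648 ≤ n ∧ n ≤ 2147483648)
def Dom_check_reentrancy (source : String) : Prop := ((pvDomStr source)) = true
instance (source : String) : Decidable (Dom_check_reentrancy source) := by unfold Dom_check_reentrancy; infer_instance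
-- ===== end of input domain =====

-- B re-decomposes A's nested window scan into a single pass that remembers the most recent
-- external-call line index (objective: simpler, one pass instead of a scan per call line).

-- ===== PORT A =====
-- any(pattern in line for pattern in ['.call{', '.transfer(', '.send('])
def pvCallPat (line : String) : Bool :=
  [".call{", ".transfer(", ".send("].any (fun p => PySem.Str.isIn p line)

-- '=' in lines[j] and 'balance' in lines[j].lower()
def pvStateUpd (line : String) : Bool :=
  PySem.Str.isIn "=" line && PySem.Str.isIn "balance" (PySem.Str.lower line)

def check_reentrancy (source : String) : Bool :=
  let lines := (PySem.Str.split? source "\n").getD []   -- source.split('\n'); sep ≠ "" so split? = some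
  (PySem.List.enumerate lines 0).any (fun p =>
    if pvCallPat p.2 then
      (PySem.List.pyRange (p.1 + 1) (min (p.1 + 5) (lines.length : Int)) 1).any
        (fun j => pvStateUpd (PySem.List.pyGetD lines j ""))
    else false)

-- ===== PORT B =====
def pvIsCall (line : String) : Bool :=
  PySem.Str.isIn ".call{" line || PySem.Str.isIn ".transfer(" line || PySem.Str.isIn ".send(" line

def pvAltLoop : List (Int × String) → Int → Bool
  | [], _ => false
  | (i, line) :: rest, lastCall =>
    if PySem.Str.isIn "=" line && PySem.Str.isIn "balance" (PySem.Str.lower line)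
        && decide (i - lastCall ≤ 4) then
      true
    else
      pvAltLoop rest (if pvIsCall line then i else lastCall)

def check_reentrancy_alt (source : String) : Bool :=
  pvAltLoop (PySem.List.enumerate ((PySem.Str.split? source "\n").getD []) 0) (-10)

-- ===== PRECONDITION & SPEC =====
def Spec_check_reentrancy (source : String) (out : Bool) : Prop := out = check_reentrancy_alt source
instance (source : String) (out : Bool) : Decidable (Spec_check_reentrancy source out) := by unfold Spec_check_reentrancy; infer_instance

-- ===== CLAIM (what is proved, stated in full; the proofs are below) =====
def Claim_equal_check_reentrancy : Prop := ∀ (source : String), Dom_check_reentrancy source → Spec_check_reentrancy source (check_reentrancy source)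

-- ===== LEMMAS AND PROOFS =====

-- generic: any over enumerate ↔ an indexed existential
theorem pv_any_enumerate {α : Type} (f : Int × α → Bool) (ls : List α) (s : Int) :
    (PySem.List.enumerate ls s).any f = true ↔
      ∃ k : Nat, ∃ hk : k < ls.length, f (s + k, ls[k]) = true := by
  induction ls generalizing s with
  | nil => simp [PySem.List.enumerate]
  | cons x xs ih =>
    rw [PySem.List.enumerate_cons]
    simp only [List.any_cons, Bool.or_eq_true, ih]
    constructor
    · rintro (h | ⟨k, hk, h⟩)
      · exact ⟨0, by simp, by simpa using h⟩
      · refine ⟨k + 1, by simpa using hk, ?_⟩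
        have : s + ((k : Int) + 1) = s + 1 + k := by ring
        simpa [this] using h
    · rintro ⟨k, hk, h⟩
      cases k with
      | zero => exact Or.inl (by simpa using h)
      | succ k =>
        refine Or.inr ⟨k, by simpa using hk, ?_⟩
        have : s + ((k : Int) + 1) = s + 1 + k := by push_cast; ring
        simpa [this] using h

-- the common "reentrancy pair" characterization
def pvPair (ls : List String) : Prop :=
  ∃ m : Nat, ∃ k : Nat, ∃ hm : m < ls.length, ∃ hk : k < ls.length,
    m < k ∧ k ≤ m + 4 ∧ pvCallPat ls[m] = true ∧ pvStateUpd ls[k] = true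

theorem pv_A_char (ls : List String) :
    ((PySem.List.enumerate ls 0).any (fun p =>
      if pvCallPat p.2 then
        (PySem.List.pyRange (p.1 + 1) (min (p.1 + 5) (ls.length : Int)) 1).any
          (fun j => pvStateUpd (PySem.List.pyGetD ls j ""))
      else false) = true) ↔ pvPair ls := by
  rw [pv_any_enumerate]
  constructor
  · rintro ⟨m, hm, h⟩
    simp only [zero_add] at h
    rw [Bool.if_false_right, Bool.and_eq_true] at h
    obtain ⟨hc, hin⟩ := h
    rw [List.any_eq_true] at hin
    obtain ⟨j, hjmem, hj⟩ := hin
    rw [PySem.List.mem_pyRange_one] at hjmem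
    obtain ⟨hj1, hj2⟩ := hjmem
    have hj0 : 0 ≤ j := by omega
    have hjlen : j < (ls.length : Int) := by omega
    rw [PySem.List.pyGetD_eq_getElem ls "" hj0 hjlen] at hj
    refine ⟨m, j.toNat, hm, by omega, by omega, by omega, by simpa using hc, hj⟩
  · rintro ⟨m, k, hm, hk, h1, h2, h3, h4⟩
    refine ⟨m, hm, ?_⟩
    simp only [zero_add]
    rw [Bool.if_false_right, Bool.and_eq_true]
    refine ⟨by simpa using h3, ?_⟩
    rw [List.any_eq_true]
    refine ⟨(k : Int), ?_, ?_⟩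
    · rw [PySem.List.mem_pyRange_one]; omega
    · rw [PySem.List.pyGetD_eq_getElem ls "" (by omega) (by exact_mod_cast hk)]
      simpa using h4

theorem pv_B_char (ls : List String) (s lc : Int) (hlc : lc < s) :
    pvAltLoop (PySem.List.enumerate ls s) lc = true ↔
      (∃ k : Nat, ∃ hk : k < ls.length, pvStateUpd ls[k] = true ∧
        (((∀ m : Nat, (hm : m < ls.length) → m < k → pvIsCall ls[m] = false) ∧ s + k - lc ≤ 4) ∨
         (∃ m : Nat, ∃ hm : m < ls.length, m < k ∧ k ≤ m + 4 ∧ pvIsCall ls[m] = true))) := by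
  induction ls generalizing s lc with
  | nil => simp [PySem.List.enumerate, pvAltLoop]
  | cons x xs ih =>
    rw [PySem.List.enumerate_cons]
    have hunf : pvAltLoop ((s, x) :: PySem.List.enumerate xs (s + 1)) lc =
        if pvStateUpd x && decide (s - lc ≤ 4) then true
        else pvAltLoop (PySem.List.enumerate xs (s + 1)) (if pvIsCall x then s else lc) := by
      simp [pvAltLoop, pvStateUpd, Bool.and_assoc]
    rw [hunf]
    by_cases hcond : (pvStateUpd x && decide (s - lc ≤ 4)) = true
    · rw [if_pos hcond]
      rw [Bool.and_eq_true, decide_eq_true_iff] at hcond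
      simp only [true_iff]
      exact ⟨0, by simp, by simpa using hcond.1, Or.inl ⟨fun m hm h => by omega, by
        push_cast; omega⟩⟩
    · rw [if_neg hcond]
      rw [Bool.and_eq_true, decide_eq_true_iff] at hcond
      push_neg at hcond
      by_cases hcall : pvIsCall x = true
      · rw [if_pos hcall, ih (s + 1) s (by omega)]
        constructor
        · rintro ⟨k, hk, hst, (⟨hno, hle⟩ | ⟨m, hm, h1, h2, h3⟩)⟩
          · refine ⟨k + 1, by simpa using hk, by simpa using hst,
              Or.inr ⟨0, by simp, by omega, by push_cast at hle ⊢ <;> omega, by simpa using hcall⟩⟩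
          · exact ⟨k + 1, by simpa using hk, by simpa using hst,
              Or.inr ⟨m + 1, by simpa using hm, by omega, by omega, by simpa using h3⟩⟩
        · rintro ⟨k, hk, hst, (⟨hno, hle⟩ | ⟨m, hm, h1, h2, h3⟩)⟩
          · exact absurd (by simpa using hno 0 (by simp) (by
              cases k with
              | zero => exact absurd (hcond (by simpa using hst)) (by omega)
              | succ k => omega)) (by simp [hcall])
          · cases k with
            | zero => omega
            | succ k =>
              cases m with
              | zero =>
                -- the call is x itself: in the tail, either no earlier call (use the left
                -- disjunct with lc' = s) or a later call still inside the window
                by_cases hex : ∃ m' : Nat, ∃ hm' : m' < xs.length, m' < k ∧ pvIsCall xs[m'] = true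
                · obtain ⟨m', hm', hmk, hmc⟩ := hex
                  exact ⟨k, by simpa using hk, by simpa using hst,
                    Or.inr ⟨m', hm', hmk, by omega, hmc⟩⟩
                · push_neg at hex
                  refine ⟨k, by simpa using hk, by simpa using hst,
                    Or.inl ⟨fun m' hm' hmk => ?_, by push_cast; omega⟩⟩
                  by_contra hcm
                  exact absurd (hex m' hm' hmk) (by simpa using hcm)
              | succ m =>
                exact ⟨k, by simpa using hk, by simpa using hst,
                  Or.inr ⟨m, by simpa using hm, by omega, by omega, by simpa using h3⟩⟩
      · rw [if_neg hcall, ih (s + 1) lc (by omega)]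
        rw [Bool.not_eq_true] at hcall
        constructor
        · rintro ⟨k, hk, hst, (⟨hno, hle⟩ | ⟨m, hm, h1, h2, h3⟩)⟩
          · refine ⟨k + 1, by simpa using hk, by simpa using hst, Or.inl ⟨?_, by push_cast at hle ⊢ <;> omega⟩⟩
            intro m hm hmk
            cases m with
            | zero => simpa using hcall
            | succ m => simpa using hno m (by simpa using hm) (by omega)
          · exact ⟨k + 1, by simpa using hk, by simpa using hst,
              Or.inr ⟨m + 1, by simpa using hm, by omega, by omega, by simpa using h3⟩⟩
        · rintro ⟨k, hk, hst, (⟨hno, hle⟩ | ⟨m, hm, h1, h2, h3⟩)⟩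
          · cases k with
            | zero => exact absurd (hcond (by simpa using hst)) (by push_cast at hle; omega)
            | succ k =>
              refine ⟨k, by simpa using hk, by simpa using hst, Or.inl ⟨?_, by push_cast at hle ⊢ <;> omega⟩⟩
              intro m hm hmk
              simpa using hno (m + 1) (by simpa using hm) (by omega)
          · cases k with
            | zero => omega
            | succ k =>
              cases m with
              | zero => exact absurd (by simpa using h3) (by simp [hcall])
              | succ m =>
                exact ⟨k, by simpa using hk, by simpa using hst,
                  Or.inr ⟨m, by simpa using hm, by omega, by omega, by simpa using h3⟩⟩

theorem pv_call_eq (line : String) : pvIsCall line = pvCallPat line := by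
  simp [pvIsCall, pvCallPat, List.any, Bool.or_assoc]

-- ===== VERDICT (by name: the statement is the Claim_ definition above) =====
theorem check_reentrancy_spec : Claim_equal_check_reentrancy := by
  intro source _
  unfold Spec_check_reentrancy check_reentrancy check_reentrancy_alt
  rw [Bool.eq_iff_iff, pv_A_char, pv_B_char _ 0 (-10) (by norm_num)]
  constructor
  · rintro ⟨m, k, hm, hk, h1, h2, h3, h4⟩
    exact ⟨k, hk, h4, Or.inr ⟨m, hm, h1, h2, by rw [pv_call_eq]; exact h3⟩⟩
  · rintro ⟨k, hk, hst, (⟨_, hle⟩ | ⟨m, hm, h1, h2, h3⟩)⟩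
    · push_cast at hle; omega
    · exact ⟨m, k, hm, hk, h1, h2, by rwa [pv_call_eq] at h3, hst⟩
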